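-- pv_equiv track=rewrite | github.com/shunaaaaabbbbb/shapley-banckruptcy | src/algorithms/fast_dp.py | compute_dp_last_layer
-- ===== SOURCE A (Python) =====
-- def compute_dp_last_layer(order, w_list, E, n):
--     """
--     pivot を除いた n-1 人の DP を計算し、
--     必要な C[n-1][w][t] のみ返す（rolling array で高速化）
--     """
--
--     # DP 配列（直前ステップと現在ステップの2層だけ）
--     prev = [[0] * (n) for _ in range(E + 1)]
--     curr = [[0] * (n) for _ in range(E + 1)]
--
--     prev[0][0] = 1  # 空集合
--
--     # i を順番に追加していく
--     # ただし pivot(=order[n-1]) は DPに含めないので n-1 まで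
--     for i in range(1, n):
--         player = order[i - 1]
--         wi = w_list[player]
--
--         # dp 更新
--         # t: subset size
--         for t in range(i + 1):
--             # w: claim sum
--             for w in range(E + 1):
--                 val = prev[w][t]
--                 if t > 0 and w >= wi:
--                     val += prev[w - wi][t - 1]
--                 curr[w][t] = val
--
--         # swap
--         prev, curr = curr, prev
--
--     return prev  # これが C[n-1] に相当
-- ===== SOURCE B (Python) =====
-- def compute_dp_last_layer(order, w_list, E, n):
--     # Divide and conquer: each player contributes the polynomial 1 + x^w * y;
--     # the answer table is the product of all n-1 polynomials, built by
--     # recursively multiplying (2-D convolving) the tables of the two halves,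
--     # truncated to claim sums <= E and subset sizes < n.
--     def zero():
--         return [[0] * n for _ in range(E + 1)]
--
--     def conv(P, Q):
--         return [[sum(P[w1][t1] * Q[w - w1][t - t1]
--                      for w1 in range(w + 1) for t1 in range(t + 1))
--                  for t in range(n)]
--                 for w in range(E + 1)]
--
--     def table(players):
--         if not players:
--             T = zero()
--             T[0][0] = 1
--             return T
--         if len(players) == 1:
--             T = zero()
--             T[0][0] = 1
--             w = players[0]
--             if 0 <= w <= E and n > 1:
--                 T[w][1] = 1
--             return T
--         mid = len(players) // 2
--         return conv(table(players[:mid]), table(players[mid:]))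
--
--     return table([w_list[order[i]] for i in range(n - 1)])
-- ===== Notes on version B (the rewrite author's own statement) =====
-- stated objective: alternative
-- what changed: Replaces A's iterative rolling-array DP (players folded in one at a time, rewriting the whole table each round) by divide and conquer over the player list: each half's count table (the coefficient table of the product of its players' generating polynomials 1 + x^w*y) is built recursively and the halves are combined by one truncated 2-D convolution.
import Mathlib
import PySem

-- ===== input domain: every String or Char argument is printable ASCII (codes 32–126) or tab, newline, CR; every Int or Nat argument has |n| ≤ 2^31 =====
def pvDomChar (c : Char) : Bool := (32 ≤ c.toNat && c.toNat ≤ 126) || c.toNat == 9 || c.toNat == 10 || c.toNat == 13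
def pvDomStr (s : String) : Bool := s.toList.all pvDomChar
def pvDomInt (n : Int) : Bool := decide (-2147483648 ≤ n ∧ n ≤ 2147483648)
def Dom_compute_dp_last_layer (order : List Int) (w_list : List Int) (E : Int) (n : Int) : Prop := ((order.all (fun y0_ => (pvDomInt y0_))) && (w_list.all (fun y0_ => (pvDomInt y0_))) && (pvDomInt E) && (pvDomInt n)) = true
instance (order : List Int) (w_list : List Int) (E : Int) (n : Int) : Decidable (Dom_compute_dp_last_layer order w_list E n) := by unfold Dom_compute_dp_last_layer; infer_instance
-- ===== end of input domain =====

-- B replaces A's iterative one-player-at-a-time rolling-array DP by divide and conquer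
-- over the player list: the table of each half is built recursively and the two tables
-- are combined by a 2-D convolution (objective: alternative algorithmic structure,
-- same exact output).

-- shared helper: `w_list[order[i]]` (Python chained indexing, negative wrap included)
def pvWeight (order w_list : List Int) (i : Int) : Int :=
  ((PySem.List.pyGet? order i).bind (fun p => PySem.List.pyGet? w_list p)).getD 0

-- ===== PORT A =====
-- Python lists are arrays; A's tables are ported as Array (Array Int) (O(1) indexing, so the
-- port evaluates at the Python's speed). All of A's reads/writes use in-range nonnegative
-- indices on every input where A returns, and there these are exactly Python's `tbl[a][b]`
-- and `tbl[w][t] = v`.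
def pvGetCell (tbl : Array (Array Int)) (a b : Int) : Int :=
  (tbl.getD a.toNat #[]).getD b.toNat 0

def pvSetCell (tbl : Array (Array Int)) (w t : Int) (v : Int) : Array (Array Int) :=
  tbl.modify w.toNat (fun row => row.setIfInBounds t.toNat v)

-- body of A's `for i in range(1, n)` loop, state = (prev, curr)
def pvBodyA (order w_list : List Int) (E : Int)
    (pc : Array (Array Int) × Array (Array Int)) (i : Int) : Array (Array Int) × Array (Array Int) :=
  let wi := pvWeight order w_list (i - 1)
  let curr := (PySem.List.pyRange 0 (i+1) 1).foldl (fun curr t =>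
      (PySem.List.pyRange 0 (E+1) 1).foldl (fun curr w =>
        let val := pvGetCell pc.1 w t
        let val := if 0 < t ∧ wi ≤ w then val + pvGetCell pc.1 (w - wi) (t - 1) else val
        pvSetCell curr w t val) curr) pc.2
  (curr, pc.1)

def compute_dp_last_layer (order : List Int) (w_list : List Int) (E : Int) (n : Int) : List (List Int) :=
  let prev : Array (Array Int) := Array.replicate (E+1).toNat (Array.replicate n.toNat (0:Int))
  let curr : Array (Array Int) := Array.replicate (E+1).toNat (Array.replicate n.toNat (0:Int))
  let prev := pvSetCell prev 0 0 1
  let res := (PySem.List.pyRange 1 n 1).foldl (pvBodyA order w_list E) (prev, curr)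
  (res.1.map (fun r => r.toList)).toList

-- ===== PORT B =====
-- B's tables are plain list-of-list matrices, read with in-range nonnegative indices
-- (exactly Python's `T[a][b]` there).
def pvGetLL (T : List (List Int)) (a b : Int) : Int :=
  (T.getD a.toNat []).getD b.toNat 0

-- `T[a][b] = v`
def pvSetLL (T : List (List Int)) (a b : Nat) (v : Int) : List (List Int) :=
  T.set a ((T.getD a []).set b v)

-- `zero()` of Source B
def pvZeroT (E n : Int) : List (List Int) :=
  List.replicate (E+1).toNat (List.replicate n.toNat (0:Int))

-- `conv(P, Q)` of Source B: the truncated 2-D convolution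
def pvConv (E n : Int) (P Q : List (List Int)) : List (List Int) :=
  (PySem.List.pyRange 0 (E+1) 1).map (fun w =>
    (PySem.List.pyRange 0 n 1).map (fun t =>
      ((PySem.List.pyRange 0 (w+1) 1).flatMap (fun w1 =>
        (PySem.List.pyRange 0 (t+1) 1).map (fun t1 =>
          pvGetLL P w1 t1 * pvGetLL Q (w - w1) (t - t1)))).sum))

-- `table(players)` of Source B: divide and conquer over the player weights
def pvTable (E n : Int) (players : List Int) : List (List Int) :=
  match players with
  | [] => pvSetLL (pvZeroT E n) 0 0 1
  | [w] =>
    let T := pvSetLL (pvZeroT E n) 0 0 1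
    if 0 ≤ w ∧ w ≤ E ∧ 1 < n then pvSetLL T w.toNat 1 1 else T
  | p1 :: p2 :: rest =>
    pvConv E n
      (pvTable E n ((p1 :: p2 :: rest).take ((p1 :: p2 :: rest).length / 2)))
      (pvTable E n ((p1 :: p2 :: rest).drop ((p1 :: p2 :: rest).length / 2)))
termination_by players.length
decreasing_by
  · simp [List.length_take]; omega
  · simp; omega

def compute_dp_last_layer_alt (order : List Int) (w_list : List Int) (E : Int) (n : Int) : List (List Int) :=
  pvTable E n ((PySem.List.pyRange 0 (n-1) 1).map (fun i => pvWeight order w_list i))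

-- ===== PRECONDITION & SPEC =====
-- `w_list[order[i]]` succeeds and is nonnegative (i-th DP weight)
def pvWOK (order w_list : List Int) (i : Nat) : Bool :=
  match (PySem.List.pyGet? order (i : Int)).bind (fun p => PySem.List.pyGet? w_list p) with
  | some v => decide (0 ≤ v)
  | none => false

-- Exactly the inputs on which Python A returns normally: A raises IndexError when
-- E < 0 or n < 1 (prev[0][0] = 1), when order is shorter than n-1 or order[i] is not a
-- valid (possibly negative) index into w_list, and when some used weight is negative
-- (then prev[w - wi] with w - wi > E is hit).
def Pre_compute_dp_last_layer (order : List Int) (w_list : List Int) (E : Int) (n : Int) : Prop :=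
  0 ≤ E ∧ 1 ≤ n ∧ n - 1 ≤ (order.length : Int) ∧
    ∀ i : Nat, i < min (n-1).toNat order.length → pvWOK order w_list i = true
instance (order : List Int) (w_list : List Int) (E : Int) (n : Int) : Decidable (Pre_compute_dp_last_layer order w_list E n) := by unfold Pre_compute_dp_last_layer; infer_instance

def pvWitness_compute_dp_last_layer : List Int × List Int × Int × Int := ([0], [2], 2, 2)

def Spec_compute_dp_last_layer (order : List Int) (w_list : List Int) (E : Int) (n : Int) (out : List (List Int)) : Prop := out = compute_dp_last_layer_alt order w_list E n
instance (order : List Int) (w_list : List Int) (E : Int) (n : Int) (out : List (List Int)) : Decidable (Spec_compute_dp_last_layer order w_list E n out) := by unfold Spec_compute_dp_last_layer; infer_instance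

-- ===== CLAIM (what is proved, stated in full; the proofs are below) =====
def Claim_equal_compute_dp_last_layer : Prop := ∀ (order : List Int) (w_list : List Int) (E : Int) (n : Int), Dom_compute_dp_last_layer order w_list E n → Pre_compute_dp_last_layer order w_list E n → Spec_compute_dp_last_layer order w_list E n (compute_dp_last_layer order w_list E n)

-- ===== LEMMAS AND PROOFS =====

-- The mathematical DP table: pvT ws a b = number of sub(multi)sets of ws with sum a and size b.
def pvT : List Int → Int → Int → Int
  | [], a, b => if a = 0 ∧ b = 0 then 1 else 0
  | wi :: ws, a, b => pvT ws a b + (if 0 < b ∧ wi ≤ a then pvT ws (a - wi) (b - 1) else 0)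

lemma pvT_eq_zero_of_lt (ws : List Int) (a b : Int) (h : (ws.length : Int) < b) :
    pvT ws a b = 0 := by
  induction ws generalizing a b with
  | nil =>
    simp only [List.length_nil, Int.natCast_zero] at h
    simp only [pvT]
    have hne : ¬ (a = 0 ∧ b = 0) := by omega
    simp [hne]
  | cons wi ws ih =>
    simp only [List.length_cons] at h
    simp only [pvT]
    rw [ih a b (by omega)]
    split_ifs with hc
    · rw [ih (a - wi) (b - 1) (by omega)]; ring
    · ring

lemma pvT_single (w a b : Int) :
    pvT [w] a b = if a = 0 ∧ b = 0 then 1 else if a = w ∧ b = 1 then 1 else 0 := by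
  simp only [pvT]
  split_ifs <;> omega

-- the product rule: the table of a concatenation is the (sufficiently wide) convolution
lemma pvT_append (ws1 ws2 : List Int) (hws : ∀ x ∈ ws1, 0 ≤ x) :
    ∀ a b : Int, 0 ≤ a → 0 ≤ b →
    pvT (ws1 ++ ws2) a b
      = ∑ p ∈ Finset.Icc (0:Int) a ×ˢ Finset.Icc (0:Int) b,
          pvT ws1 p.1 p.2 * pvT ws2 (a - p.1) (b - p.2) := by
  induction ws1 with
  | nil =>
    intro a b ha hb
    rw [List.nil_append]
    rw [Finset.sum_congr rfl (fun p hp => show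
        pvT [] p.1 p.2 * pvT ws2 (a - p.1) (b - p.2)
          = if p = ((0,0) : Int × Int) then pvT ws2 a b else 0 from by
      by_cases h : p = ((0,0) : Int × Int)
      · subst h; simp [pvT]
      · rw [if_neg h]
        have : ¬ (p.1 = 0 ∧ p.2 = 0) := by
          intro hc; exact h (Prod.ext hc.1 hc.2)
        simp [pvT, this])]
    rw [Finset.sum_ite_eq' _ ((0,0) : Int × Int)]
    rw [if_pos (by simp [Finset.mem_product]; omega)]
  | cons w ws1 ih =>
    intro a b ha hb
    have hw : 0 ≤ w := hws w List.mem_cons_self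
    have hws1 : ∀ x ∈ ws1, 0 ≤ x := fun x hx => hws x (List.mem_cons_of_mem _ hx)
    have ih' := ih hws1
    rw [List.cons_append]
    show pvT (ws1 ++ ws2) a b + (if 0 < b ∧ w ≤ a then pvT (ws1 ++ ws2) (a - w) (b - 1) else 0) = _
    rw [Finset.sum_congr rfl (fun p hp => show
        pvT (w :: ws1) p.1 p.2 * pvT ws2 (a - p.1) (b - p.2)
          = pvT ws1 p.1 p.2 * pvT ws2 (a - p.1) (b - p.2)
            + (if (0:Int) < p.2 ∧ w ≤ p.1 then
                pvT ws1 (p.1 - w) (p.2 - 1) * pvT ws2 (a - p.1) (b - p.2) else 0) from by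
      rw [show pvT (w :: ws1) p.1 p.2
            = pvT ws1 p.1 p.2 + (if 0 < p.2 ∧ w ≤ p.1 then pvT ws1 (p.1 - w) (p.2 - 1) else 0)
          from rfl, add_mul, ite_mul, zero_mul])]

    rw [Finset.sum_add_distrib, ← ih' a b ha hb]
    congr 1
    by_cases hc : 0 < b ∧ w ≤ a
    · rw [if_pos hc]
      rw [Finset.sum_ite, Finset.sum_const_zero, add_zero]
      rw [ih' (a - w) (b - 1) (by omega) (by omega)]
      apply Finset.sum_nbij' (i := fun q => ((q.1 + w, q.2 + 1) : Int × Int))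
        (j := fun p => ((p.1 - w, p.2 - 1) : Int × Int))
      · intro p hp
        simp only [Finset.mem_filter, Finset.mem_product, Finset.mem_Icc] at hp ⊢
        omega
      · intro q hq
        simp only [Finset.mem_filter, Finset.mem_product, Finset.mem_Icc] at hq ⊢
        omega
      · intro p hp; simp
      · intro q hq; simp
      · intro p hp
        have h1 : p.1 + w - w = p.1 := by ring
        have h2 : p.2 + 1 - 1 = p.2 := by ring
        have h3 : a - (p.1 + w) = a - w - p.1 := by ring
        have h4 : b - (p.2 + 1) = b - 1 - p.2 := by ring
        simp only [h1, h2, h3, h4]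
    · rw [if_neg hc]
      symm
      apply Finset.sum_eq_zero
      intro p hp
      simp only [Finset.mem_product, Finset.mem_Icc] at hp
      rw [if_neg (by omega)]

-- appending one nonnegative player on the right
lemma pvT_snoc (ws : List Int) (w a b : Int) (hws : ∀ x ∈ ws, 0 ≤ x) (hw : 0 ≤ w)
    (ha : 0 ≤ a) (hb : 0 ≤ b) :
    pvT (ws ++ [w]) a b
      = pvT ws a b + (if 0 < b ∧ w ≤ a then pvT ws (a - w) (b - 1) else 0) := by
  rw [pvT_append ws [w] hws a b ha hb]
  rw [Finset.sum_congr rfl (fun p hp => show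
      pvT ws p.1 p.2 * pvT [w] (a - p.1) (b - p.2)
        = (if p = ((a, b) : Int × Int) then pvT ws a b else 0)
          + (if 0 < b ∧ w ≤ a then
              (if p = ((a - w, b - 1) : Int × Int) then pvT ws (a - w) (b - 1) else 0) else 0)
      from by
    rcases p with ⟨p1, p2⟩
    simp only [Finset.mem_product, Finset.mem_Icc] at hp
    rw [pvT_single]
    dsimp only
    by_cases h1 : p1 = a ∧ p2 = b
    · obtain ⟨rfl, rfl⟩ := h1
      rw [if_pos ⟨sub_self _, sub_self _⟩, mul_one, if_pos rfl,
          show (if 0 < p2 ∧ w ≤ p1 then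
              (if ((p1, p2) : Int × Int) = (p1 - w, p2 - 1) then pvT ws (p1 - w) (p2 - 1) else 0)
            else 0) = 0 from by
        split_ifs with hc hq
        · exfalso; rw [Prod.mk.injEq] at hq; omega
        · rfl
        · rfl]
      ring
    · rw [if_neg (show ¬ (a - p1 = 0 ∧ b - p2 = 0) from by omega),
          if_neg (show ¬ ((p1, p2) : Int × Int) = (a, b) from fun hh =>
            h1 (by rw [Prod.mk.injEq] at hh; exact hh))]
      by_cases h2 : a - p1 = w ∧ b - p2 = 1
      · rw [if_pos h2, mul_one, if_pos (show 0 < b ∧ w ≤ a from by omega),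
            if_pos (show ((p1, p2) : Int × Int) = (a - w, b - 1) from by
              rw [Prod.mk.injEq]; omega)]
        have e1 : p1 = a - w := by omega
        have e2 : p2 = b - 1 := by omega
        rw [e1, e2]; ring
      · rw [if_neg h2, mul_zero,
            show (if 0 < b ∧ w ≤ a then
                (if ((p1, p2) : Int × Int) = (a - w, b - 1) then pvT ws (a - w) (b - 1) else 0)
              else 0) = 0 from by
          split_ifs with hc hq
          · exfalso; rw [Prod.mk.injEq] at hq; omega
          · rfl
          · rfl]
        ring)]
  rw [Finset.sum_add_distrib]
  congr 1
  · rw [Finset.sum_ite_eq' _ ((a, b) : Int × Int), if_pos (by simp [Finset.mem_product]; omega)]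
  · by_cases hc : 0 < b ∧ w ≤ a
    · rw [Finset.sum_congr rfl (fun p hp => if_pos hc), if_pos hc,
          Finset.sum_ite_eq' _ ((a - w, b - 1) : Int × Int),
          if_pos (by simp [Finset.mem_product]; omega)]
    · rw [Finset.sum_congr rfl (fun p hp => if_neg hc), if_neg hc, Finset.sum_const_zero]

-- table after the first k players have been folded in
def pvF (order w_list : List Int) (k : Nat) (a b : Int) : Int :=
  pvT ((PySem.List.pyRange 0 (k : Int) 1).map (pvWeight order w_list)) a b

lemma pvF_zero (order w_list : List Int) (a b : Int) :
    pvF order w_list 0 a b = if a = 0 ∧ b = 0 then 1 else 0 := by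
  simp [pvF, pvT]

lemma pvF_succ (order w_list : List Int) (k : Nat)
    (hw : ∀ j : Nat, j < k + 1 → 0 ≤ pvWeight order w_list (j : Int))
    (a b : Int) (ha : 0 ≤ a) (hb : 0 ≤ b) :
    pvF order w_list (k+1) a b =
      pvF order w_list k a b +
        (if 0 < b ∧ pvWeight order w_list (k : Int) ≤ a then
            pvF order w_list k (a - pvWeight order w_list (k : Int)) (b - 1) else 0) := by
  unfold pvF
  rw [show (((k+1:Nat)):Int) = (k:Int) + 1 from by omega,
      PySem.List.pyRange_one_succ_right (a := 0) (b := (k:Int)) (by omega),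
      List.map_append, List.map_singleton]
  exact pvT_snoc _ _ a b (by
    intro x hx
    obtain ⟨j, hj, rfl⟩ := List.mem_map.mp hx
    obtain ⟨hj0, hjk⟩ := (PySem.List.mem_pyRange_one).mp hj
    obtain ⟨jn, rfl⟩ : ∃ jn : Nat, j = (jn : Int) := ⟨j.toNat, by omega⟩
    exact hw jn (by omega)) (hw k (by omega)) ha hb

lemma pvF_zero_of_lt (order w_list : List Int) (k : Nat) (a b : Int) (h : (k : Int) < b) :
    pvF order w_list k a b = 0 := by
  apply pvT_eq_zero_of_lt
  simp only [List.length_map, PySem.List.length_pyRange_one]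
  omega

-- ---------- B side ----------

lemma pv_sum_flatMap (l : List Int) (f : Int → List Int) :
    (l.flatMap f).sum = (l.map (fun x => (f x).sum)).sum := by
  induction l with
  | nil => rfl
  | cons x xs ih => simp [List.flatMap_cons, ih]

lemma pv_sum_map_pyRange (m : Int) (f : Int → Int) :
    ((PySem.List.pyRange 0 m 1).map f).sum = ∑ i ∈ Finset.range m.toNat, f (i:Int) := by
  rw [PySem.List.pyRange_one, List.map_map]
  simp only [zero_add, sub_zero]
  rfl

lemma pv_sum_range_Icc (a : Int) (ha : 0 ≤ a) (f : Int → Int) :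
    ∑ i ∈ Finset.range (a.toNat+1), f (i:Int) = ∑ x ∈ Finset.Icc (0:Int) a, f x := by
  apply Finset.sum_nbij' (i := fun (i:Nat) => (i:Int)) (j := fun (x:Int) => x.toNat) <;>
    intros <;> simp_all

lemma pvGetLL_conv (E n : Int) (P Q : List (List Int)) (a b : Int)
    (ha0 : 0 ≤ a) (haE : a ≤ E) (hb0 : 0 ≤ b) (hbn : b < n) :
    pvGetLL (pvConv E n P Q) a b
      = ∑ p ∈ Finset.Icc (0:Int) a ×ˢ Finset.Icc (0:Int) b,
          pvGetLL P p.1 p.2 * pvGetLL Q (a - p.1) (b - p.2) := by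
  rw [show pvGetLL (pvConv E n P Q) a b
        = (((pvConv E n P Q).getD a.toNat []).getD b.toNat 0) from rfl]
  unfold pvConv
  rw [List.getD_eq_getElem _ []
        (by simp only [List.length_map, PySem.List.length_pyRange_one]; omega),
      List.getElem_map, List.getD_eq_getElem _ 0
        (by simp only [List.length_map, PySem.List.length_pyRange_one]; omega),
      List.getElem_map, PySem.List.getElem_pyRange_one, PySem.List.getElem_pyRange_one,
      show (0:Int) + (a.toNat:Int) = a from by omega,
      show (0:Int) + (b.toNat:Int) = b from by omega]
  rw [pv_sum_flatMap, pv_sum_map_pyRange,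
      Finset.sum_congr rfl (fun i _ => pv_sum_map_pyRange (b+1) _),
      show (a+1).toNat = a.toNat + 1 from by omega,
      pv_sum_range_Icc a ha0 (fun x => ∑ i ∈ Finset.range (b+1).toNat,
        pvGetLL P x (i:Int) * pvGetLL Q (a - x) (b - (i:Int))),
      Finset.sum_congr rfl (fun x _ => by
        rw [show (b+1).toNat = b.toNat + 1 from by omega,
            pv_sum_range_Icc b hb0 (fun y =>
              pvGetLL P x y * pvGetLL Q (a - x) (b - y))]),
      Finset.sum_product]

lemma pvZeroT_rows (E n : Int) : ∀ row ∈ pvZeroT E n, row.length = n.toNat := by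
  intro row hrow
  rw [List.eq_of_mem_replicate hrow, List.length_replicate]

lemma pvBase0_length (E n : Int) :
    (pvSetLL (pvZeroT E n) 0 0 1).length = (E+1).toNat := by
  simp [pvSetLL, pvZeroT]

lemma pvBase0_rows (E n : Int) (hE : 0 ≤ E) :
    ∀ row ∈ pvSetLL (pvZeroT E n) 0 0 1, row.length = n.toNat := by
  intro row hrow
  rcases List.mem_or_eq_of_mem_set hrow with h | rfl
  · exact pvZeroT_rows E n row h
  · rw [List.length_set, List.getD_eq_getElem _ []
        (by simp only [pvZeroT, List.length_replicate]; omega)]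
    exact pvZeroT_rows E n _ (List.getElem_mem _)

lemma pvGetLL_setLL (T : List (List Int)) (N r c : Nat) (v : Int) (i j : Int)
    (hi0 : 0 ≤ i) (hj0 : 0 ≤ j) (hr : r < T.length) (hcN : c < N)
    (hrows : ∀ row ∈ T, row.length = N) :
    pvGetLL (pvSetLL T r c v) i j
      = if i = (r:Int) ∧ j = (c:Int) then v else pvGetLL T i j := by
  have hgetT : ∀ (k : Nat), (T.set r ((T.getD r []).set c v)).getD k []
      = if k = r then (T.getD r []).set c v else T.getD k [] := by
    intro k
    by_cases hk : k < T.length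
    · rw [List.getD_eq_getElem _ [] (by rw [List.length_set]; exact hk), List.getElem_set]
      by_cases h : k = r
      · subst h; rw [if_pos rfl, if_pos rfl]
      · rw [if_neg (fun hh => h hh.symm), if_neg h, List.getD_eq_getElem T [] hk]
    · rw [List.getD_eq_default _ [] (by rw [List.length_set]; omega),
          if_neg (show ¬ k = r from by omega), List.getD_eq_default T [] (by omega)]
  unfold pvGetLL pvSetLL
  rw [hgetT i.toNat]
  have hrlen : (T.getD r []).length = N := by
    rw [List.getD_eq_getElem T [] hr]; exact hrows _ (List.getElem_mem _)
  by_cases hir : i.toNat = r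
  · rw [if_pos hir]
    by_cases hj : j.toNat < N
    · rw [List.getD_eq_getElem _ 0 (by rw [List.length_set, hrlen]; exact hj),
          List.getElem_set]
      by_cases hjc : c = j.toNat
      · rw [if_pos hjc, if_pos (by omega)]
      · rw [if_neg hjc, if_neg (show ¬ (i = (r:Int) ∧ j = (c:Int)) from by omega),
            hir, List.getD_eq_getElem _ 0 (by rw [hrlen]; exact hj)]
    · rw [List.getD_eq_default _ 0 (by rw [List.length_set, hrlen]; omega),
          if_neg (show ¬ (i = (r:Int) ∧ j = (c:Int)) from by omega),
          hir, List.getD_eq_default _ 0 (by rw [hrlen]; omega)]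
  · rw [if_neg hir, if_neg (show ¬ (i = (r:Int) ∧ j = (c:Int)) from by omega)]

lemma pvGetLL_zeroT (E n : Int) (a b : Int) : pvGetLL (pvZeroT E n) a b = 0 := by
  unfold pvGetLL pvZeroT
  by_cases h1 : a.toNat < (E+1).toNat
  · rw [List.getD_eq_getElem _ [] (by rw [List.length_replicate]; exact h1),
        List.getElem_replicate]
    by_cases h2 : b.toNat < n.toNat
    · rw [List.getD_eq_getElem _ 0 (by rw [List.length_replicate]; exact h2),
          List.getElem_replicate]
    · rw [List.getD_eq_default _ 0 (by rw [List.length_replicate]; omega)]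
  · rw [List.getD_eq_default _ [] (by rw [List.length_replicate]; omega)]
    simp [List.getD]

lemma pvGetLL_base0 (E n : Int) (hE : 0 ≤ E) (hn : 1 ≤ n) (a b : Int)
    (ha : 0 ≤ a) (hb : 0 ≤ b) :
    pvGetLL (pvSetLL (pvZeroT E n) 0 0 1) a b = if a = 0 ∧ b = 0 then 1 else 0 := by
  rw [pvGetLL_setLL (pvZeroT E n) n.toNat 0 0 1 a b ha hb
        (by simp only [pvZeroT, List.length_replicate]; omega) (by omega)
        (pvZeroT_rows E n),
      pvGetLL_zeroT]
  norm_num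

lemma pvTable_length (E n : Int) (ws : List Int) :
    (pvTable E n ws).length = (E+1).toNat := by
  match ws with
  | [] =>
    rw [show pvTable E n [] = pvSetLL (pvZeroT E n) 0 0 1 from by unfold pvTable; rfl]
    exact pvBase0_length E n
  | [w] =>
    rw [show pvTable E n [w] =
        (if 0 ≤ w ∧ w ≤ E ∧ 1 < n then
          pvSetLL (pvSetLL (pvZeroT E n) 0 0 1) w.toNat 1 1
        else pvSetLL (pvZeroT E n) 0 0 1) from by unfold pvTable; rfl]
    split_ifs
    · rw [pvSetLL, List.length_set]; exact pvBase0_length E n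
    · exact pvBase0_length E n
  | p1 :: p2 :: rest =>
    rw [pvTable]
    simp [pvConv, PySem.List.length_pyRange_one]

lemma pvTable_rows (E n : Int) (hE : 0 ≤ E) (ws : List Int) :
    ∀ row ∈ pvTable E n ws, row.length = n.toNat := by
  match ws with
  | [] =>
    rw [show pvTable E n [] = pvSetLL (pvZeroT E n) 0 0 1 from by unfold pvTable; rfl]
    exact pvBase0_rows E n hE
  | [w] =>
    rw [show pvTable E n [w] =
        (if 0 ≤ w ∧ w ≤ E ∧ 1 < n then
          pvSetLL (pvSetLL (pvZeroT E n) 0 0 1) w.toNat 1 1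
        else pvSetLL (pvZeroT E n) 0 0 1) from by unfold pvTable; rfl]
    split_ifs with hg
    · intro row hrow
      rcases List.mem_or_eq_of_mem_set hrow with h | rfl
      · exact pvBase0_rows E n hE row h
      · rw [List.length_set, List.getD_eq_getElem _ []
            (by rw [pvBase0_length]; omega)]
        exact pvBase0_rows E n hE _ (List.getElem_mem _)
    · exact pvBase0_rows E n hE
  | p1 :: p2 :: rest =>
    rw [pvTable]
    intro row hrow
    simp only [pvConv, List.mem_map] at hrow
    obtain ⟨w, -, rfl⟩ := hrow
    simp [PySem.List.length_pyRange_one]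

lemma pvTable_get (E n : Int) (hE : 0 ≤ E) (hn : 1 ≤ n) :
    ∀ ws : List Int, (∀ x ∈ ws, 0 ≤ x) → ∀ a b : Int,
      0 ≤ a → a ≤ E → 0 ≤ b → b < n →
      pvGetLL (pvTable E n ws) a b = pvT ws a b := by
  intro ws
  induction hlen : ws.length using Nat.strong_induction_on generalizing ws with
  | _ L IH =>
  match ws with
  | [] =>
    intro hws a b ha0 haE hb0 hbn
    rw [show pvTable E n [] = pvSetLL (pvZeroT E n) 0 0 1 from by unfold pvTable; rfl,
        pvGetLL_base0 E n hE hn a b ha0 hb0]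
    rfl
  | [w] =>
    intro hws a b ha0 haE hb0 hbn
    have hw0 : 0 ≤ w := hws w List.mem_cons_self
    rw [show pvTable E n [w] =
        (if 0 ≤ w ∧ w ≤ E ∧ 1 < n then
          pvSetLL (pvSetLL (pvZeroT E n) 0 0 1) w.toNat 1 1
        else pvSetLL (pvZeroT E n) 0 0 1) from by unfold pvTable; rfl,
        pvT_single]
    by_cases hg : 0 ≤ w ∧ w ≤ E ∧ 1 < n
    · rw [if_pos hg]
      rw [pvGetLL_setLL _ n.toNat w.toNat 1 1 a b ha0 hb0
            (by rw [pvBase0_length]; omega) (by omega) (pvBase0_rows E n hE),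
          pvGetLL_base0 E n hE hn a b ha0 hb0,
          show ((w.toNat : Nat) : Int) = w from by omega,
          show (((1:Nat)) : Int) = 1 from by omega]
      split_ifs <;> omega
    · rw [if_neg hg, pvGetLL_base0 E n hE hn a b ha0 hb0]
      split_ifs <;> omega
  | p1 :: p2 :: rest =>
    intro hws a b ha0 haE hb0 hbn
    subst hlen
    have htk : ((p1 :: p2 :: rest).take ((p1 :: p2 :: rest).length / 2)).length
        < (p1 :: p2 :: rest).length := by
      rw [List.length_take]; simp only [List.length_cons]; omega
    have hdr : ((p1 :: p2 :: rest).drop ((p1 :: p2 :: rest).length / 2)).length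
        < (p1 :: p2 :: rest).length := by
      rw [List.length_drop]; simp only [List.length_cons]; omega
    have htknn : ∀ x ∈ (p1 :: p2 :: rest).take ((p1 :: p2 :: rest).length / 2), 0 ≤ x :=
      fun x hx => hws x (List.mem_of_mem_take hx)
    have hdrnn : ∀ x ∈ (p1 :: p2 :: rest).drop ((p1 :: p2 :: rest).length / 2), 0 ≤ x :=
      fun x hx => hws x (List.mem_of_mem_drop hx)
    rw [pvTable, pvGetLL_conv E n _ _ a b ha0 haE hb0 hbn,
        Finset.sum_congr rfl (fun p hp => by
          have hpm : 0 ≤ p.1 ∧ p.1 ≤ a ∧ 0 ≤ p.2 ∧ p.2 ≤ b := by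
            simpa only [Finset.mem_product, Finset.mem_Icc, and_assoc] using hp
          rw [IH _ htk _ rfl htknn p.1 p.2 (by omega) (by omega) (by omega) (by omega),
              IH _ hdr _ rfl hdrnn (a - p.1) (b - p.2)
                (by omega) (by omega) (by omega) (by omega)]),
        ← pvT_append _ _ htknn a b ha0 hb0, List.take_append_drop]

-- ---------- A side ----------

def pvShape (E n : Int) (tbl : Array (Array Int)) : Prop :=
  tbl.size = (E+1).toNat ∧ ∀ (i : Nat) (h : i < tbl.size), tbl[i].size = n.toNat

lemma pv_getD_lt {α : Type} (xs : Array α) (i : Nat) (d : α) (h : i < xs.size) :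
    xs.getD i d = xs[i] := by
  simp [Array.getD, h]

lemma pv_getD_ge {α : Type} (xs : Array α) (i : Nat) (d : α) (h : ¬ i < xs.size) :
    xs.getD i d = d := by
  simp [Array.getD, h]

lemma pvShape_setCell (E n : Int) (tbl : Array (Array Int)) (w t v : Int)
    (h : pvShape E n tbl) : pvShape E n (pvSetCell tbl w t v) := by
  obtain ⟨hlen, hrows⟩ := h
  constructor
  · unfold pvSetCell
    rw [Array.size_modify]
    exact hlen
  · intro i hi
    unfold pvSetCell at hi ⊢
    rw [Array.getElem_modify]
    have hi' : i < tbl.size := by rwa [Array.size_modify] at hi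
    split_ifs
    · rw [Array.size_setIfInBounds]
      exact hrows i hi'
    · exact hrows i hi'

lemma pvGetCell_setCell (E n : Int) (tbl : Array (Array Int)) (w t v a b : Int)
    (hs : pvShape E n tbl)
    (hw0 : 0 ≤ w) (hw1 : w < E + 1) (ht0 : 0 ≤ t) (ht1 : t < n)
    (ha0 : 0 ≤ a) (ha1 : a < E + 1) (hb0 : 0 ≤ b) (hb1 : b < n) :
    pvGetCell (pvSetCell tbl w t v) a b = if a = w ∧ b = t then v else pvGetCell tbl a b := by
  obtain ⟨hlen, hrows⟩ := hs
  obtain ⟨wn, rfl⟩ : ∃ wn : Nat, w = (wn : Int) := ⟨w.toNat, by omega⟩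
  obtain ⟨tn, rfl⟩ : ∃ tn : Nat, t = (tn : Int) := ⟨t.toNat, by omega⟩
  obtain ⟨an, rfl⟩ : ∃ an : Nat, a = (an : Int) := ⟨a.toNat, by omega⟩
  obtain ⟨bn, rfl⟩ : ∃ bn : Nat, b = (bn : Int) := ⟨b.toNat, by omega⟩
  have halt : an < tbl.size := by omega
  have hblt : bn < tbl[an].size := by rw [hrows an halt]; omega
  simp only [pvGetCell, pvSetCell, Int.toNat_natCast]
  have hmod : (tbl.modify wn (fun row => row.setIfInBounds tn v)).getD an #[]
      = if wn = an then tbl[an].setIfInBounds tn v else tbl[an] := by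
    rw [pv_getD_lt _ _ _ (by rw [Array.size_modify]; omega), Array.getElem_modify]
  rw [hmod, pv_getD_lt tbl an #[] halt]
  by_cases han : an = wn
  · subst han
    rw [if_pos rfl]
    have hset : (tbl[an].setIfInBounds tn v).getD bn 0
        = if tn = bn then v else tbl[an][bn] := by
      rw [pv_getD_lt _ _ _ (by rw [Array.size_setIfInBounds]; omega),
          Array.getElem_setIfInBounds hblt]
    rw [hset, pv_getD_lt _ _ _ hblt]
    split_ifs <;> first | rfl | omega
  · rw [if_neg (fun hh => han hh.symm),
        if_neg (fun hh => han (by exact_mod_cast hh.1))]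

lemma pvGetCell_replicate (E n : Int) (a b : Int) :
    pvGetCell (Array.replicate (E+1).toNat (Array.replicate n.toNat (0:Int))) a b = 0 := by
  simp only [pvGetCell]
  by_cases h1 : a.toNat < (E+1).toNat
  · rw [pv_getD_lt (Array.replicate (E+1).toNat (Array.replicate n.toNat (0:Int))) a.toNat #[]
        (by rw [Array.size_replicate]; omega), Array.getElem_replicate]
    by_cases h2 : b.toNat < n.toNat
    · rw [pv_getD_lt (Array.replicate n.toNat (0:Int)) b.toNat 0
          (by rw [Array.size_replicate]; omega), Array.getElem_replicate]
    · rw [pv_getD_ge (Array.replicate n.toNat (0:Int)) b.toNat 0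
          (by rw [Array.size_replicate]; omega)]
  · rw [pv_getD_ge (Array.replicate (E+1).toNat (Array.replicate n.toNat (0:Int))) a.toNat #[]
        (by rw [Array.size_replicate]; omega), pv_getD_ge #[] b.toNat 0 (by simp)]

lemma pvGetCell_getElem (tbl : Array (Array Int)) (i j : Nat)
    (h1 : i < tbl.size) (h2 : j < tbl[i].size) :
    pvGetCell tbl (i:Int) (j:Int) = tbl[i][j] := by
  simp only [pvGetCell, Int.toNat_natCast]
  rw [pv_getD_lt tbl i #[] h1, pv_getD_lt tbl[i] j 0 h2]

lemma pv_rowloop (E n : Int) (_hE : 0 ≤ E) (_hn : 1 ≤ n)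
    (prevT : Array (Array Int)) (wi t : Int) (ht0 : 0 ≤ t) (ht1 : t < n)
    (m : Nat) (hm : (m : Int) ≤ E + 1) (c : Array (Array Int)) (hc : pvShape E n c) :
    pvShape E n ((PySem.List.pyRange 0 (m : Int) 1).foldl (fun curr w =>
        pvSetCell curr w t (if 0 < t ∧ wi ≤ w then
          pvGetCell prevT w t + pvGetCell prevT (w - wi) (t - 1) else pvGetCell prevT w t)) c) ∧
    (∀ a b : Int, 0 ≤ a → a < E + 1 → 0 ≤ b → b < n →
      pvGetCell ((PySem.List.pyRange 0 (m : Int) 1).foldl (fun curr w =>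
        pvSetCell curr w t (if 0 < t ∧ wi ≤ w then
          pvGetCell prevT w t + pvGetCell prevT (w - wi) (t - 1) else pvGetCell prevT w t)) c) a b
        = if a < (m : Int) ∧ b = t then
            (if 0 < t ∧ wi ≤ a then
              pvGetCell prevT a t + pvGetCell prevT (a - wi) (t - 1) else pvGetCell prevT a t)
          else pvGetCell c a b) := by
  induction m with
  | zero =>
    rw [show ((0:Nat):Int) = 0 from by simp, PySem.List.pyRange_one_eq_nil (le_refl 0),
        List.foldl_nil]
    refine ⟨hc, ?_⟩
    intro a b ha0 ha1 hb0 hb1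
    rw [if_neg (by omega)]
  | succ m ih =>
    obtain ⟨ihs, ihg⟩ := ih (by push_cast at hm ⊢; omega)
    rw [show (((m+1:Nat)):Int) = (m:Int) + 1 from by omega,
        PySem.List.pyRange_one_succ_right (a := 0) (b := (m:Int)) (by omega),
        List.foldl_append, List.foldl_cons, List.foldl_nil]
    constructor
    · exact pvShape_setCell E n _ _ _ _ ihs
    · intro a b ha0 ha1 hb0 hb1
      rw [pvGetCell_setCell E n _ (m:Int) t _ a b ihs (by omega) (by push_cast at hm; omega)
          ht0 ht1 ha0 ha1 hb0 hb1, ihg a b ha0 ha1 hb0 hb1]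
      by_cases hab : a = (m:Int) ∧ b = t
      · have ha' := hab.1
        rw [if_pos hab, if_pos (show a < (m:Int) + 1 ∧ b = t from by omega)]
        rw [ha']
      · rw [if_neg hab]
        by_cases h2 : a < (m:Int) ∧ b = t
        · rw [if_pos h2, if_pos (show a < (m:Int) + 1 ∧ b = t from by omega)]
        · rw [if_neg h2, if_neg (show ¬(a < (m:Int) + 1 ∧ b = t) from by omega)]

lemma pv_tloop (E n : Int) (hE : 0 ≤ E) (hn : 1 ≤ n)
    (prevT : Array (Array Int)) (wi : Int)
    (m : Nat) (hm : (m : Int) ≤ n) (c : Array (Array Int)) (hc : pvShape E n c) :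
    pvShape E n ((PySem.List.pyRange 0 (m : Int) 1).foldl (fun curr t =>
        (PySem.List.pyRange 0 (E+1) 1).foldl (fun curr w =>
          pvSetCell curr w t (if 0 < t ∧ wi ≤ w then
            pvGetCell prevT w t + pvGetCell prevT (w - wi) (t - 1) else pvGetCell prevT w t))
          curr) c) ∧
    (∀ a b : Int, 0 ≤ a → a < E + 1 → 0 ≤ b → b < n →
      pvGetCell ((PySem.List.pyRange 0 (m : Int) 1).foldl (fun curr t =>
        (PySem.List.pyRange 0 (E+1) 1).foldl (fun curr w =>
          pvSetCell curr w t (if 0 < t ∧ wi ≤ w then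
            pvGetCell prevT w t + pvGetCell prevT (w - wi) (t - 1) else pvGetCell prevT w t))
          curr) c) a b
        = if b < (m : Int) then
            (if 0 < b ∧ wi ≤ a then
              pvGetCell prevT a b + pvGetCell prevT (a - wi) (b - 1) else pvGetCell prevT a b)
          else pvGetCell c a b) := by
  induction m with
  | zero =>
    rw [show ((0:Nat):Int) = 0 from by simp, PySem.List.pyRange_one_eq_nil (le_refl 0),
        List.foldl_nil]
    refine ⟨hc, ?_⟩
    intro a b ha0 ha1 hb0 hb1
    rw [if_neg (by omega)]
  | succ m ih =>
    obtain ⟨ihs, ihg⟩ := ih (by push_cast at hm ⊢; omega)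
    rw [show (((m+1:Nat)):Int) = (m:Int) + 1 from by omega,
        PySem.List.pyRange_one_succ_right (a := 0) (b := (m:Int)) (by omega),
        List.foldl_append, List.foldl_cons, List.foldl_nil]
    have hrow := pv_rowloop E n hE hn prevT wi (m:Int) (by omega) (by omega) (E+1).toNat
      (by omega) _ ihs
    rw [show (((E+1).toNat:Nat):Int) = E + 1 from by omega] at hrow
    refine ⟨hrow.1, ?_⟩
    intro a b ha0 ha1 hb0 hb1
    rw [hrow.2 a b ha0 ha1 hb0 hb1]
    by_cases hab : b = (m:Int)
    · rw [if_pos (show a < E + 1 ∧ b = (m:Int) from ⟨ha1, hab⟩),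
          if_pos (show b < (m:Int) + 1 from by omega)]
      rw [hab]
    · rw [if_neg (show ¬(a < E + 1 ∧ b = (m:Int)) from by omega),
          ihg a b ha0 ha1 hb0 hb1]
      by_cases h2 : b < (m:Int)
      · rw [if_pos h2, if_pos (show b < (m:Int) + 1 from by omega)]
      · rw [if_neg h2, if_neg (show ¬(b < (m:Int) + 1) from by omega)]

lemma pv_A_step (order w_list : List Int) (E n : Int) (hE : 0 ≤ E) (hn : 1 ≤ n)
    (m : Nat) (hm2 : (m:Int) ≤ n - 2)
    (hwall : ∀ j : Nat, j < m + 1 → 0 ≤ pvWeight order w_list (j:Int))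
    (prev curr : Array (Array Int)) (hsp : pvShape E n prev) (hsc : pvShape E n curr)
    (hprev : ∀ a b : Int, 0 ≤ a → a < E+1 → 0 ≤ b → b < n →
      pvGetCell prev a b = pvF order w_list m a b)
    (hcurr : ∀ a b : Int, 0 ≤ a → a < E+1 → 0 ≤ b → b < n → (m:Int) ≤ b →
      pvGetCell curr a b = 0) :
    pvShape E n (pvBodyA order w_list E (prev, curr) (1 + (m:Int))).1 ∧
    pvShape E n (pvBodyA order w_list E (prev, curr) (1 + (m:Int))).2 ∧
    (∀ a b : Int, 0 ≤ a → a < E+1 → 0 ≤ b → b < n →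
      pvGetCell (pvBodyA order w_list E (prev, curr) (1 + (m:Int))).1 a b
        = pvF order w_list (m+1) a b) ∧
    (∀ a b : Int, 0 ≤ a → a < E+1 → 0 ≤ b → b < n → (m:Int) + 1 ≤ b →
      pvGetCell (pvBodyA order w_list E (prev, curr) (1 + (m:Int))).2 a b = 0) := by
  unfold pvBodyA
  dsimp only
  rw [show (1 + (m:Int) - 1) = (m:Int) from by ring,
      show (1 + (m:Int) + 1) = (((m+2:Nat)):Int) from by omega]
  have htl := pv_tloop E n hE hn prev (pvWeight order w_list (m:Int)) (m+2)
    (by push_cast; omega) curr hsc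
  refine ⟨htl.1, hsp, ?_, ?_⟩
  · intro a b ha0 ha1 hb0 hb1
    rw [htl.2 a b ha0 ha1 hb0 hb1]
    by_cases hb : b < ((m+2:Nat):Int)
    · rw [if_pos hb, pvF_succ order w_list m hwall a b ha0 hb0]
      by_cases hcnd : 0 < b ∧ pvWeight order w_list (m:Int) ≤ a
      · rw [if_pos hcnd, if_pos hcnd, hprev a b ha0 ha1 hb0 hb1,
            hprev (a - pvWeight order w_list (m:Int)) (b - 1) (by omega)
              (by have := hwall m (by omega); omega) (by omega) (by omega)]
      · rw [if_neg hcnd, if_neg hcnd, hprev a b ha0 ha1 hb0 hb1]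
        ring
    · rw [if_neg hb, hcurr a b ha0 ha1 hb0 hb1 (by push_cast at hb; omega),
          pvF_zero_of_lt _ _ _ _ _ (by push_cast at hb; omega)]
  · intro a b ha0 ha1 hb0 hb1 hbm
    rw [hprev a b ha0 ha1 hb0 hb1, pvF_zero_of_lt _ _ _ _ _ (by omega)]

lemma pv_A_loop (order w_list : List Int) (E n : Int) (hE : 0 ≤ E) (hn : 1 ≤ n)
    (hw : ∀ j : Nat, (j:Int) ≤ n - 2 → 0 ≤ pvWeight order w_list (j : Int))
    (m : Nat) (hm : (m : Int) ≤ n - 1) :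
    pvShape E n ((PySem.List.pyRange 1 (1 + (m : Int)) 1).foldl (pvBodyA order w_list E)
        (pvSetCell (Array.replicate (E+1).toNat (Array.replicate n.toNat (0:Int))) 0 0 1,
         Array.replicate (E+1).toNat (Array.replicate n.toNat (0:Int)))).1 ∧
    pvShape E n ((PySem.List.pyRange 1 (1 + (m : Int)) 1).foldl (pvBodyA order w_list E)
        (pvSetCell (Array.replicate (E+1).toNat (Array.replicate n.toNat (0:Int))) 0 0 1,
         Array.replicate (E+1).toNat (Array.replicate n.toNat (0:Int)))).2 ∧
    (∀ a b : Int, 0 ≤ a → a < E + 1 → 0 ≤ b → b < n →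
      pvGetCell ((PySem.List.pyRange 1 (1 + (m : Int)) 1).foldl (pvBodyA order w_list E)
        (pvSetCell (Array.replicate (E+1).toNat (Array.replicate n.toNat (0:Int))) 0 0 1,
         Array.replicate (E+1).toNat (Array.replicate n.toNat (0:Int)))).1 a b
        = pvF order w_list m a b) ∧
    (∀ a b : Int, 0 ≤ a → a < E + 1 → 0 ≤ b → b < n → (m : Int) ≤ b →
      pvGetCell ((PySem.List.pyRange 1 (1 + (m : Int)) 1).foldl (pvBodyA order w_list E)
        (pvSetCell (Array.replicate (E+1).toNat (Array.replicate n.toNat (0:Int))) 0 0 1,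
         Array.replicate (E+1).toNat (Array.replicate n.toNat (0:Int)))).2 a b = 0) := by
  induction m with
  | zero =>
    rw [show (1 + ((0:Nat):Int)) = 1 from by omega,
        PySem.List.pyRange_one_eq_nil (le_refl 1), List.foldl_nil]
    have hsh0 : pvShape E n (Array.replicate (E+1).toNat (Array.replicate n.toNat (0:Int))) := by
      refine ⟨Array.size_replicate, ?_⟩
      intro i hi
      rw [Array.getElem_replicate, Array.size_replicate]
    have hsh1 : pvShape E n
        (pvSetCell (Array.replicate (E+1).toNat (Array.replicate n.toNat (0:Int))) 0 0 1) :=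
      pvShape_setCell E n _ 0 0 1 hsh0
    refine ⟨hsh1, hsh0, ?_, ?_⟩
    · intro a b ha0 ha1 hb0 hb1
      rw [pvGetCell_setCell E n _ 0 0 1 a b hsh0 (le_refl 0) (by omega) (le_refl 0) (by omega)
          ha0 ha1 hb0 hb1, pvF_zero, pvGetCell_replicate]
    · intro a b ha0 ha1 hb0 hb1 hbm
      exact pvGetCell_replicate E n a b
  | succ m ih =>
    obtain ⟨ihp, ihc, ihprev, ihcurr⟩ := ih (by push_cast at hm ⊢; omega)
    rw [show (1 + ((m+1:Nat):Int)) = (1 + (m:Int)) + 1 from by omega,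
        PySem.List.pyRange_one_succ_right (a := 1) (b := 1 + (m:Int)) (by omega),
        List.foldl_append, List.foldl_cons, List.foldl_nil]
    have hstep := pv_A_step order w_list E n hE hn m (by push_cast at hm; omega)
      (fun j hj => hw j (by push_cast at hm; omega)) _ _ ihp ihc ihprev ihcurr
    refine ⟨hstep.1, hstep.2.1, hstep.2.2.1, ?_⟩
    intro a b ha0 ha1 hb0 hb1 hbm
    exact hstep.2.2.2 a b ha0 ha1 hb0 hb1 (by push_cast at hbm; omega)

-- ===== VERDICT (by name: the statement is the Claim_ definition above) =====
theorem compute_dp_last_layer_spec : Claim_equal_compute_dp_last_layer := by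
  intro order w_list E n hDom hPre
  obtain ⟨hE, hn, hlen, hwok⟩ := hPre
  have hw : ∀ j : Nat, (j:Int) ≤ n - 2 → 0 ≤ pvWeight order w_list (j:Int) := by
    intro j hj
    have hh := hwok j (by omega)
    unfold pvWOK at hh
    unfold pvWeight
    rcases hb : (PySem.List.pyGet? order (j:Int)).bind (fun p => PySem.List.pyGet? w_list p)
      with _ | v
    · rw [hb] at hh; simp at hh
    · rw [hb] at hh
      simp only [decide_eq_true_eq] at hh
      simpa using hh
  unfold Spec_compute_dp_last_layer
  have hA := pv_A_loop order w_list E n hE hn hw (n-1).toNat (by omega)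
  rw [show (1 + (((n-1).toNat:Nat):Int)) = n from by omega] at hA
  obtain ⟨hshA, -, hentA, -⟩ := hA
  have hwsnn : ∀ x ∈ (PySem.List.pyRange 0 (n-1) 1).map (fun i => pvWeight order w_list i),
      0 ≤ x := by
    intro x hx
    obtain ⟨j, hj, rfl⟩ := List.mem_map.mp hx
    obtain ⟨hj0, hj1⟩ := PySem.List.mem_pyRange_one.mp hj
    obtain ⟨jn, rfl⟩ : ∃ jn : Nat, j = (jn:Int) := ⟨j.toNat, by omega⟩
    exact hw jn (by omega)
  have hBlen := pvTable_length E n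
    ((PySem.List.pyRange 0 (n-1) 1).map (fun i => pvWeight order w_list i))
  have hBrows := pvTable_rows E n hE
    ((PySem.List.pyRange 0 (n-1) 1).map (fun i => pvWeight order w_list i))
  unfold compute_dp_last_layer compute_dp_last_layer_alt
  dsimp only
  apply List.ext_getElem
  · simp only [Array.length_toList, Array.size_map, hshA.1]
    exact hBlen.symm
  · intro i h1 h2
    have hsz : i < ((PySem.List.pyRange 1 n 1).foldl (pvBodyA order w_list E)
        (pvSetCell (Array.replicate (E+1).toNat (Array.replicate n.toNat (0:Int))) 0 0 1,
         Array.replicate (E+1).toNat (Array.replicate n.toNat (0:Int)))).1.size := by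
      simpa only [Array.length_toList, Array.size_map] using h1
    have hrowsz := hshA.2 i hsz
    have hiE : (i:Int) < E + 1 := by
      have := hsz
      rw [hshA.1] at this
      omega
    have hBi : i < ((PySem.List.pyRange 0 (n-1) 1).map
        (fun i => pvWeight order w_list i) |> pvTable E n).length := by
      rw [hBlen]; omega
    apply List.ext_getElem
    · simp only [Array.getElem_toList, Array.getElem_map, Array.length_toList, hrowsz]
      rw [hBrows _ (List.getElem_mem hBi)]
    · intro j hj1 hj2
      have hjsz : j < ((PySem.List.pyRange 1 n 1).foldl (pvBodyA order w_list E)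
          (pvSetCell (Array.replicate (E+1).toNat (Array.replicate n.toNat (0:Int))) 0 0 1,
           Array.replicate (E+1).toNat (Array.replicate n.toNat (0:Int)))).1[i].size := by
        simpa only [Array.getElem_toList, Array.getElem_map, Array.length_toList] using hj1
      have hjn : (j:Int) < n := by
        have := hjsz
        rw [hrowsz] at this
        omega
      have hval := hentA (i:Int) (j:Int) (by omega) hiE (by omega) hjn
      rw [pvGetCell_getElem _ i j hsz hjsz] at hval
      simp only [Array.getElem_toList, Array.getElem_map]
      rw [hval]
      have hBj : j < ((pvTable E n ((PySem.List.pyRange 0 (n-1) 1).map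
          (fun i => pvWeight order w_list i)))[i]'hBi).length := by
        rw [hBrows _ (List.getElem_mem hBi)]; omega
      have hBget : pvGetLL (pvTable E n ((PySem.List.pyRange 0 (n-1) 1).map
            (fun i => pvWeight order w_list i))) (i:Int) (j:Int)
          = ((pvTable E n ((PySem.List.pyRange 0 (n-1) 1).map
            (fun i => pvWeight order w_list i)))[i]'hBi)[j]'hBj := by
        unfold pvGetLL
        rw [Int.toNat_natCast, Int.toNat_natCast,
            List.getD_eq_getElem _ [] hBi, List.getD_eq_getElem _ 0 hBj]
      rw [← hBget,
          pvTable_get E n hE hn _ hwsnn (i:Int) (j:Int) (by omega) (by omega) (by omega) hjn]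
      unfold pvF
      rw [show (((n-1).toNat:Nat):Int) = n - 1 from by omega]
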